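-- pv_equiv track=rewrite | github.com/DROP-TABLE-CS407/Machine-Unlearning-x-Continual-Learning | CUL/allMetrics.py | _state_sets
-- ===== SOURCE A (Python) =====
-- from typing import Dict, List, Set, Tuple
--
-- TASK_SEQUENCE: List[int] = [
--      0, 1, 2, 3, 4, 5, 6, 7, 8, 9,
--     10,11,12,13,14,15,16,17,18,19,
--     -19,-18,-17,-16,-15,-14,-13,-12,
--     -11,-10,-9,-8,-7,-6,-5,-4,-3,-2,-1
-- ]      # as before
--
-- def _state_sets(i: int) -> Tuple[Set[int], Set[int]]:
--     """For iteration i return (forget S, retain R) using the *last* sign seen."""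
--     state = {}                                  # tid → last sign (±1)
--     for k in range(i + 1):
--         tid = TASK_SEQUENCE[k]
--         state[abs(tid)] = 1 if tid >= 0 else -1
--     S = {t for t, s in state.items() if s < 0}
--     R = {t for t, s in state.items() if s > 0}
--     return S, R
-- ===== SOURCE B (Python) =====
-- TASK_SEQUENCE = [
--      0, 1, 2, 3, 4, 5, 6, 7, 8, 9,
--     10,11,12,13,14,15,16,17,18,19,
--     -19,-18,-17,-16,-15,-14,-13,-12,
--     -11,-10,-9,-8,-7,-6,-5,-4,-3,-2,-1
-- ]
--
-- def _state_sets(i):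
--     """Closed form over the fixed sequence: the first 20 entries introduce
--     0..19 with sign +1, and entry 20+m (m >= 0) flips task 19-m to -1.
--     So after the prefix up to j = min(i, 38): tasks 39-j..19 are forgotten
--     (when j >= 20) and the rest retained."""
--     j = min(i, 38)
--     if j < 0:
--         return set(), set()
--     if j <= 19:
--         return set(), set(range(j + 1))
--     return set(range(39 - j, 20)), set(range(39 - j))
-- ===== Notes on version B (the rewrite author's own statement) =====
-- stated objective: simpler
-- what changed: Replaces the dict-building loop over the prefix plus two post-partition set comprehensions with a closed-form case split on j = min(i,38) that emits the two ranges directly.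
import Mathlib
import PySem

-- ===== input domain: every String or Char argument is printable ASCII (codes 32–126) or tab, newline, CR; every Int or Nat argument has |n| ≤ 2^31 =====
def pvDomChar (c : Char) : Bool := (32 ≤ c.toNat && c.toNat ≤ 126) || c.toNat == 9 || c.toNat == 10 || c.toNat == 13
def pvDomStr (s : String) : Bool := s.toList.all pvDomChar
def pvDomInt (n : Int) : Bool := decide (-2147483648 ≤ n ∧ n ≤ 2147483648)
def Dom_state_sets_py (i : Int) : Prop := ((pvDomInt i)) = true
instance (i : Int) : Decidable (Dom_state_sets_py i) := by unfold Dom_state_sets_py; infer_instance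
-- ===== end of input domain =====

-- B replaces A's dict loop + post-partition with a closed-form case split on min(i,38) (closed form instead of the loop).

-- ===== PORT A =====
def taskSequence : List Int :=
  [0,1,2,3,4,5,6,7,8,9,10,11,12,13,14,15,16,17,18,19,
   -19,-18,-17,-16,-15,-14,-13,-12,-11,-10,-9,-8,-7,-6,-5,-4,-3,-2,-1]

def state_sets_py (i : Int) : List Int × List Int :=
  let state : PySem.Dict Int Int :=
    (PySem.List.pyRange 0 (i+1) 1).foldl
      (fun st k =>
        -- TASK_SEQUENCE[k]: exact under Pre_ (every k in range(i+1) is then in range)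
        let tid := PySem.List.pyGetD taskSequence k 0
        st.insert |tid| (if 0 ≤ tid then 1 else -1))
      PySem.Dict.empty
  let S := PySem.Set.ofList ((state.items.filter (fun p => p.2 < 0)).map Prod.fst)
  let R := PySem.Set.ofList ((state.items.filter (fun p => 0 < p.2)).map Prod.fst)
  (S, R)

-- ===== PORT B =====
def state_sets_py_alt (i : Int) : List Int × List Int :=
  let j := min i 38
  if j < 0 then ([], [])
  else if j ≤ 19 then ([], PySem.List.pyRange 0 (j+1) 1)
  else (PySem.List.pyRange (39 - j) 20 1, PySem.List.pyRange 0 (39 - j) 1)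

-- ===== PRECONDITION & SPEC =====
-- A raises IndexError as soon as the loop indexes past the 39-entry TASK_SEQUENCE, i.e. for i ≥ 39.
def Pre_state_sets_py (i : Int) : Prop := i ≤ 38
instance (i : Int) : Decidable (Pre_state_sets_py i) := by unfold Pre_state_sets_py; infer_instance
def pvWitness_state_sets_py : Int := 20

def Spec_state_sets_py (i : Int) (out : List Int × List Int) : Prop := out = state_sets_py_alt i
instance (i : Int) (out : List Int × List Int) : Decidable (Spec_state_sets_py i out) := by unfold Spec_state_sets_py; infer_instance

-- ===== CLAIM (what is proved, stated in full; the proofs are below) =====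
def Claim_equal_state_sets_py : Prop := ∀ (i : Int), Dom_state_sets_py i → Pre_state_sets_py i → Spec_state_sets_py i (state_sets_py i)

-- ===== LEMMAS AND PROOFS =====

-- every nonnegative prefix end up to 38, checked by evaluation
theorem state_sets_eq_fin : ∀ n : Fin 39, state_sets_py (n : Int) = state_sets_py_alt (n : Int) := by
  decide

theorem state_sets_eq_neg (i : Int) (h : i < 0) : state_sets_py i = state_sets_py_alt i := by
  have h1 : i + 1 ≤ 0 := by omega
  have hmin : min i 38 = i := by omega
  simp [state_sets_py, state_sets_py_alt, PySem.List.pyRange_one_eq_nil h1, hmin, h,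
        PySem.Dict.empty, PySem.Set.ofList]

-- ===== VERDICT (by name: the statement is the Claim_ definition above) =====
theorem state_sets_py_spec : Claim_equal_state_sets_py := by
  intro i _ hpre
  unfold Spec_state_sets_py
  rcases lt_or_ge i 0 with h | h
  · exact state_sets_eq_neg i h
  · have hn : i.toNat < 39 := by unfold Pre_state_sets_py at hpre; omega
    have : i = ((⟨i.toNat, hn⟩ : Fin 39) : Int) := by simp; omega
    rw [this]
    exact state_sets_eq_fin _
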